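-- pv_equiv track=rewrite | github.com/hshubhang/NatGen | Python_Programs/Results/result_demopy2.py | proc_data
-- ===== SOURCE A (Python) =====
-- def proc_data ( data ) :
--     result = 0
--     for i in range ( len ( data ) ):
--         if i % 2 == 0:
--             result += data[i] * 2
--         else:
--             result += data[i] * 3
--     return result
-- ===== SOURCE B (Python) =====
-- def proc_data(data):
--     return 2 * sum(data[0::2]) + 3 * sum(data[1::2])
-- ===== Notes on version B (the rewrite author's own statement) =====
-- stated objective: simpler
-- what changed: Replaces the index loop with its per-element parity branch by two whole-slice reductions: weight 2 on the even-index stride data[0::2] and weight 3 on the odd-index stride data[1::2].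
import Mathlib
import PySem

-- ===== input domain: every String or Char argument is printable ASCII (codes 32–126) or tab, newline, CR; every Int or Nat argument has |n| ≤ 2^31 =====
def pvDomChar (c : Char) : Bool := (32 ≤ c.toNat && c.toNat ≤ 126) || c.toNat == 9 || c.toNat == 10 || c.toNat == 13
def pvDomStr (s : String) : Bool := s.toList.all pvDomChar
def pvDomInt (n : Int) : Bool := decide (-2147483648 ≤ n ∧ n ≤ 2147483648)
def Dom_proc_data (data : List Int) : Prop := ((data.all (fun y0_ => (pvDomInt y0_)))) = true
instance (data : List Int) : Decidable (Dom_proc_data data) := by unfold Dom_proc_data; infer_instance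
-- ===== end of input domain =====

-- B replaces A's index loop with its per-element parity branch by two strided slice sums (weight 2 on data[0::2], weight 3 on data[1::2]); objective: simpler.


-- ===== PORT A =====
-- literal port of A's loop: for i in range(len(data)), branch on i % 2, accumulate.
-- (pyGetD with default 0 is exact here: every i drawn from the range is in bounds, so data[i] never raises)
def proc_data (data : List Int) : Int :=
  (PySem.List.pyRange 0 data.length 1).foldl
    (fun result i =>
      if PySem.Int.mod i 2 == 0 then result + (PySem.List.pyGetD data i 0) * 2
      else result + (PySem.List.pyGetD data i 0) * 3) 0

-- ===== PORT B =====
-- literal port of B: 2 * sum(data[0::2]) + 3 * sum(data[1::2]); step 2 ≠ 0 so slice? is always some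
def proc_data_alt (data : List Int) : Int :=
  2 * ((PySem.List.slice? data (some 0) none 2).getD []).sum
  + 3 * ((PySem.List.slice? data (some 1) none 2).getD []).sum

-- ===== PRECONDITION & SPEC =====
def Spec_proc_data (data : List Int) (out : Int) : Prop := out = proc_data_alt data
instance (data : List Int) (out : Int) : Decidable (Spec_proc_data data out) := by unfold Spec_proc_data; infer_instance

-- ===== CLAIM (what is proved, stated in full; the proofs are below) =====
def Claim_equal_proc_data : Prop := ∀ (data : List Int), Dom_proc_data data → Spec_proc_data data (proc_data data)

-- ===== LEMMAS AND PROOFS =====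

-- the even-indexed elements of a list
def pvEvens : List Int → List Int
  | [] => []
  | [a] => [a]
  | a :: _ :: l => a :: pvEvens l

-- the odd-indexed elements of a list
def pvOdds : List Int → List Int
  | [] => []
  | [_] => []
  | _ :: b :: l => b :: pvOdds l

-- alternating-weight sum; the Bool is "the current index is even"
def pvG : Bool → List Int → Int
  | _, [] => 0
  | true, a :: l => a * 2 + pvG false l
  | false, a :: l => a * 3 + pvG true l

theorem pvEvens_spec (l : List Int) :
    List.filterMap (fun k => l[2 * k]?) (List.range ((l.length + 1) / 2)) = pvEvens l := by
  induction l using pvEvens.induct with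
  | case1 => simp [pvEvens]
  | case2 a => simp [pvEvens, List.range_succ]
  | case3 a b l ih =>
    have hlen : (((a :: b :: l).length + 1) / 2) = (l.length + 1) / 2 + 1 := by
      simp; omega
    rw [hlen, List.range_succ_eq_map, List.filterMap_cons, List.filterMap_map]
    have hf : ((fun k => (a :: b :: l)[2 * k]?) ∘ Nat.succ) = fun k => l[2 * k]? := by
      funext k
      have h2 : 2 * Nat.succ k = (2 * k) + 1 + 1 := by omega
      simp [Function.comp, h2]
    rw [hf]
    simp [pvEvens, ih]

theorem pvOdds_cons (l : List Int) (a : Int) : pvOdds (a :: l) = pvEvens l := by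
  induction l using pvEvens.induct generalizing a with
  | case1 => rfl
  | case2 b => rfl
  | case3 b c l ih => simp [pvOdds, pvEvens, ih]

theorem slice_step2_evens (xs : List Int) :
    PySem.List.slice? xs (some 0) none 2 = some (pvEvens xs) := by
  simp only [PySem.List.slice?, PySem.List.sliceIndices]
  norm_num
  have hc : (if 0 < xs.length then (((xs.length : Int) + 2 - 1) / 2).toNat else 0)
      = (xs.length + 1) / 2 := by split <;> omega
  have hf : (fun x : Nat => xs[((2 : Int) * ↑x).toNat]?) = fun k => xs[2 * k]? := by
    funext k
    have h : ((2 : Int) * (k : Int)).toNat = 2 * k := by omega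
    rw [h]
  rw [hc, hf, pvEvens_spec]

theorem slice_step2_odds (xs : List Int) :
    PySem.List.slice? xs (some 1) none 2 = some (pvOdds xs) := by
  cases xs with
  | nil => decide
  | cons a l =>
    simp only [PySem.List.slice?, PySem.List.sliceIndices]
    norm_num
    have hc : (if 0 < l.length then (((l.length : Int) + 2 - 1) / 2).toNat else 0)
        = (l.length + 1) / 2 := by split <;> omega
    have hf : (fun x : Nat => (a :: l)[((1 : Int) + 2 * ↑x).toNat]?) = fun k => l[2 * k]? := by
      funext k
      have h : ((1 : Int) + 2 * (k : Int)).toNat = 2 * k + 1 := by omega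
      rw [h]
      simp
    rw [hc, hf, pvEvens_spec, pvOdds_cons]

theorem pvG_eq (l : List Int) :
    pvG true l = 2 * (pvEvens l).sum + 3 * (pvOdds l).sum := by
  induction l using pvEvens.induct with
  | case1 => simp [pvG, pvEvens, pvOdds]
  | case2 a => simp [pvG, pvEvens, pvOdds]; ring
  | case3 a b l ih => simp [pvG, pvEvens, pvOdds, ih]; ring

theorem pvMod_beq (n : Nat) : (PySem.Int.mod (n:Int) 2 == 0) = (n % 2 == 0) := by
  rw [PySem.Int.mod_eq_emod_of_pos (by norm_num : (0:Int) < 2), Bool.eq_iff_iff]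
  simp only [beq_iff_eq]
  omega

theorem pvGetD_mid (pre l : List Int) (a : Int) :
    PySem.List.pyGetD (pre ++ a :: l) (pre.length : Int) 0 = a := by
  rw [PySem.List.pyGetD_natCast]
  simp

theorem procA_general (post pre : List Int) (acc : Int) :
    (PySem.List.pyRange pre.length (pre.length + post.length) 1).foldl
      (fun result i =>
        if PySem.Int.mod i 2 == 0 then result + (PySem.List.pyGetD (pre ++ post) i 0) * 2
        else result + (PySem.List.pyGetD (pre ++ post) i 0) * 3) acc
    = acc + pvG (pre.length % 2 == 0) post := by
  induction post generalizing pre acc with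
  | nil => rw [PySem.List.pyRange_one_eq_nil (by simp)]; simp [pvG]
  | cons a l ih =>
    rw [PySem.List.pyRange_one_cons (by simp only [List.length_cons]; push_cast; omega)]
    rw [List.foldl_cons]
    simp only [pvMod_beq, pvGetD_mid]
    have h1 : ((pre.length : Int) + 1) = ((pre ++ [a]).length : Int) := by simp
    have h2 : ((pre.length : Int) + (a :: l).length) = ((pre ++ [a]).length : Int) + l.length := by
      simp only [List.length_append, List.length_cons, List.length_nil]; push_cast; omega
    have h3 : pre ++ a :: l = (pre ++ [a]) ++ l := by simp
    rw [h2]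
    conv_lhs => rw [h1, h3]
    rw [ih]
    have hpar : ((pre ++ [a]).length % 2 == 0) = !(pre.length % 2 == 0) := by
      rw [Bool.eq_iff_iff]; simp; omega
    rw [hpar]
    cases h : (pre.length % 2 == 0) <;> simp [pvG] <;> ring

-- ===== VERDICT (by name: the statement is the Claim_ definition above) =====
theorem proc_data_spec : Claim_equal_proc_data := by
  intro data _
  unfold Spec_proc_data proc_data proc_data_alt
  have h := procA_general data [] 0
  simp only [List.nil_append, List.length_nil, Nat.cast_zero, zero_add, Nat.zero_mod] at h
  rw [show ((0:Nat) == 0) = true from rfl] at h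
  rw [h, slice_step2_evens, slice_step2_odds, pvG_eq]
  simp
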